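-- pv_equiv track=rewrite | github.com/rmd926/GPE-Practice | GPE_problems/gpe_11266_Generate random numbers/gpe_11266.py | count_diff_middle
-- ===== SOURCE A (Python) =====
-- def count_diff_middle(target: int):
--     """
--     以中間平方法從初始種子 target 產生序列，
--     回傳出現過的不同值個數（含 target 本身）。
--     """
--     seen = set()
--     current = target
--     while current not in seen:
--         seen.add(current)
--
--         # 平方並補零至 8 位
--         mid_sq = str(current ** 2).zfill(8)
--         # 取中間 4 位作為下一個值
--         current = int(mid_sq[2:6])
--
--     return len(seen)
-- ===== SOURCE B (Python) =====
-- def _mid_step(x):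
--     # one middle-square step: square, zero-pad to 8 digits, take the middle 4
--     return int(str(x * x).zfill(8)[2:6])
--
--
-- def count_diff_middle(target: int):
--     # Floyd's tortoise-and-hare cycle detection on the middle-square map:
--     # the number of distinct values visited before the first repeat is
--     # mu (tail length) + lam (cycle length), found in O(1) extra space.
--     tortoise = _mid_step(target)
--     hare = _mid_step(_mid_step(target))
--     while tortoise != hare:
--         tortoise = _mid_step(tortoise)
--         hare = _mid_step(_mid_step(hare))
--     # find mu: distance from the seed to the cycle start
--     mu = 0
--     ptr = target
--     while ptr != tortoise:
--         ptr = _mid_step(ptr)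
--         tortoise = _mid_step(tortoise)
--         mu += 1
--     # find lam: cycle length
--     lam = 1
--     h = _mid_step(tortoise)
--     while h != tortoise:
--         h = _mid_step(h)
--         lam += 1
--     return mu + lam
-- ===== Notes on version B (the rewrite author's own statement) =====
-- stated objective: alternative
-- what changed: Replaces A's hash-set accumulation (O(n) extra space, membership test per step) by Floyd's tortoise-and-hare cycle detection, returning tail length mu plus cycle length lam with O(1) extra space.
import Mathlib
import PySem

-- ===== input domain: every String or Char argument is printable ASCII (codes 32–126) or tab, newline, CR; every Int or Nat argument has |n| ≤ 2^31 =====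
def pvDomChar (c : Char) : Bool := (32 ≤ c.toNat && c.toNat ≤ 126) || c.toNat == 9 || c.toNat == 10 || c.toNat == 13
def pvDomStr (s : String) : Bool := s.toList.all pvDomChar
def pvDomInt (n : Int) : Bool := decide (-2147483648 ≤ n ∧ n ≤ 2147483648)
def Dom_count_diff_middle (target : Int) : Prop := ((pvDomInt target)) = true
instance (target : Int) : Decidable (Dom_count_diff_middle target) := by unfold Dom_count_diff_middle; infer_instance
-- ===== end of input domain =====

-- B replaces A's hash-set accumulation by Floyd's tortoise-and-hare cycle detection (mu + lam), O(1) extra space.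

-- ===== PORT A =====
-- while-loop ported with fuel; 20000 fuel always suffices (the sequence repeats within
-- 10002 steps, proved below), so the fuel-exhaustion default is never reached.
-- int(mid_sq[2:6]) never raises (the slice is 4 decimal digits, proved below), so .getD 0 is never used.
def pvLoopA (fuel : Nat) (seen : PySem.Set Int) (current : Int) : Int :=
  match fuel with
  | 0 => PySem.Set.len seen
  | fuel' + 1 =>
    if PySem.Set.contains seen current then PySem.Set.len seen
    else
      let mid_sq := PySem.Str.zfill (PySem.Int.toStr (current ^ 2)) 8
      pvLoopA fuel' (PySem.Set.add seen current)
        ((PySem.Int.ofStr? (PySem.Str.slice mid_sq (some 2) (some 6))).getD 0)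

def count_diff_middle (target : Int) : Int :=
  pvLoopA 20000 PySem.Set.empty target

-- ===== PORT B =====
-- one middle-square step (Source B's _mid_step); int(...) never raises here, so .getD 0 is never used
def pvMidStep (x : Int) : Int :=
  (PySem.Int.ofStr? (PySem.Str.slice (PySem.Str.zfill (PySem.Int.toStr (x * x)) 8) (some 2) (some 6))).getD 0

-- phase 1: advance tortoise by one step, hare by two, until they meet (fuel-bounded while)
def pvFloyd1 (fuel : Nat) (tortoise hare : Int) : Int :=
  match fuel with
  | 0 => tortoise
  | fuel' + 1 =>
    if tortoise = hare then tortoise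
    else pvFloyd1 fuel' (pvMidStep tortoise) (pvMidStep (pvMidStep hare))

-- phase 2: find mu, moving ptr from the seed and tortoise from the meeting point
def pvFloyd2 (fuel : Nat) (ptr tortoise : Int) (mu : Int) : Int × Int :=
  match fuel with
  | 0 => (mu, tortoise)
  | fuel' + 1 =>
    if ptr = tortoise then (mu, tortoise)
    else pvFloyd2 fuel' (pvMidStep ptr) (pvMidStep tortoise) (mu + 1)

-- phase 3: find lam, walking around the cycle once
def pvFloyd3 (fuel : Nat) (h tortoise : Int) (lam : Int) : Int :=
  match fuel with
  | 0 => lam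
  | fuel' + 1 =>
    if h = tortoise then lam
    else pvFloyd3 fuel' (pvMidStep h) tortoise (lam + 1)

def count_diff_middle_alt (target : Int) : Int :=
  let t0 := pvMidStep target
  let h0 := pvMidStep (pvMidStep target)
  let meet := pvFloyd1 20000 t0 h0
  let p := pvFloyd2 20000 target meet 0
  let lam := pvFloyd3 20000 (pvMidStep p.2) p.2 1
  p.1 + lam

-- ===== PRECONDITION & SPEC =====
def Spec_count_diff_middle (target : Int) (out : Int) : Prop := out = count_diff_middle_alt target
instance (target : Int) (out : Int) : Decidable (Spec_count_diff_middle target out) := by unfold Spec_count_diff_middle; infer_instance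

-- ===== CLAIM (what is proved, stated in full; the proofs are below) =====
def Claim_equal_count_diff_middle : Prop := ∀ (target : Int), Dom_count_diff_middle target → Spec_count_diff_middle target (count_diff_middle target)

-- ===== LEMMAS AND PROOFS =====

-- the iterate of the middle-square step
def pvIt (x : Int) (n : Nat) : Int := pvMidStep^[n] x

-- stopping time of A: first index whose value already occurred
noncomputable def pvN0 (x : Int) : Nat := sInf {n | ∃ i, i < n ∧ pvIt x i = pvIt x n}
-- tail length: first index whose value occurs again later
noncomputable def pvMu (x : Int) : Nat := sInf {i | ∃ j, i < j ∧ pvIt x i = pvIt x j}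
-- cycle length
noncomputable def pvLam (x : Int) : Nat := sInf {p | 0 < p ∧ pvIt x (pvMu x + p) = pvIt x (pvMu x)}
-- Floyd meeting index
noncomputable def pvM (x : Int) : Nat := sInf {m | 0 < m ∧ pvIt x m = pvIt x (2 * m)}

lemma pvIt_zero (x : Int) : pvIt x 0 = x := rfl

lemma pvIt_succ (x : Int) (n : Nat) : pvIt x (n + 1) = pvMidStep (pvIt x n) :=
  Function.iterate_succ_apply' _ _ _

lemma pvIt_congr_add (x : Int) {a b : Nat} (t : Nat) (h : pvIt x a = pvIt x b) :
    pvIt x (t + a) = pvIt x (t + b) := by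
  unfold pvIt at *
  rw [Function.iterate_add_apply, Function.iterate_add_apply, h]

-- ---- the step map lands in [0, 10000) ----

def pvDigitsL : List Char := ['0','1','2','3','4','5','6','7','8','9']

set_option maxHeartbeats 4000000 in
lemma pvParse4 :
    (pvDigitsL.all fun a => pvDigitsL.all fun b => pvDigitsL.all fun c => pvDigitsL.all fun d =>
      match PySem.Int.ofChars? [a, b, c, d] with
      | some v => decide (0 ≤ v ∧ v < 10000)
      | none => false) = true := by decide

lemma mem_pvDigitsL {c : Char} (h : c.isDigit = true) : c ∈ pvDigitsL := by
  have h1 : 48 ≤ c.toNat := by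
    simp only [Char.isDigit, decide_eq_true_eq, Bool.and_eq_true] at h
    exact h.1
  have h2 : c.toNat ≤ 57 := by
    simp only [Char.isDigit, decide_eq_true_eq, Bool.and_eq_true] at h
    exact h.2
  have hc : Char.ofNat c.toNat = c := Char.ofNat_toNat c
  set n := c.toNat with hn
  rw [← hc]
  interval_cases n <;> decide

lemma not_sign_of_isDigit {c : Char} (h : c.isDigit = true) : ¬(c = '+' ∨ c = '-') := by
  rintro (rfl | rfl) <;> simp at h

lemma pvParse4_bound {a b c d : Char} (ha : a.isDigit = true) (hb : b.isDigit = true)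
    (hc : c.isDigit = true) (hd : d.isDigit = true) :
    ∃ v, PySem.Int.ofChars? [a, b, c, d] = some v ∧ 0 ≤ v ∧ v < 10000 := by
  have h := pvParse4
  simp only [List.all_eq_true] at h
  have h4 := h a (mem_pvDigitsL ha) b (mem_pvDigitsL hb) c (mem_pvDigitsL hc) d (mem_pvDigitsL hd)
  cases hv : PySem.Int.ofChars? [a, b, c, d] with
  | none => rw [hv] at h4; simp at h4
  | some v =>
    rw [hv] at h4
    exact ⟨v, rfl, of_decide_eq_true h4⟩

lemma pvListFour {α : Type} (l : List α) (h : l.length = 4) : ∃ a b c d, l = [a, b, c, d] := by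
  rcases l with _ | ⟨a, _ | ⟨b, _ | ⟨c, _ | ⟨d, _ | ⟨e, t⟩⟩⟩⟩⟩ <;> simp_all

lemma pvZfill8_digits {cs : List Char} (hdig : ∀ c ∈ cs, c.isDigit = true) (hpos : 0 < cs.length) :
    ∀ c ∈ PySem.Chars.zfill cs 8, c.isDigit = true := by
  unfold PySem.Chars.zfill
  split
  · exact hdig
  · cases cs with
    | nil => simp at hpos
    | cons c0 rest =>
      have hc0 : ¬(c0 = '+' ∨ c0 = '-') :=
        not_sign_of_isDigit (hdig c0 List.mem_cons_self)
      show ∀ c ∈ (if c0 = '+' ∨ c0 = '-' then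
          c0 :: (List.replicate (Int.toNat 8 - (c0 :: rest).length) '0' ++ rest)
        else List.replicate (Int.toNat 8 - (c0 :: rest).length) '0' ++ c0 :: rest),
        c.isDigit = true
      rw [if_neg hc0]
      intro c hcmem
      rcases List.mem_append.mp hcmem with hrep | hcs
      · rw [List.eq_of_mem_replicate hrep]; decide
      · exact hdig c hcs

lemma pvStep_val (y : Int) :
    ∃ v, PySem.Int.ofStr?
        (PySem.Str.slice (PySem.Str.zfill (PySem.Int.toStr (y * y)) 8) (some 2) (some 6))
        = some v ∧ 0 ≤ v ∧ v < 10000 := by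
  -- digits of str(y*y)
  have hsq : ¬((y * y : Int) < 0) := not_lt.mpr (mul_self_nonneg y)
  have hchars : PySem.Int.toChars (y * y) = Nat.toDigits 10 (y * y).toNat := by
    unfold PySem.Int.toChars; rw [if_neg hsq]
  set D := Nat.toDigits 10 (y * y).toNat with hD
  have hDdig : ∀ c ∈ D, c.isDigit = true := fun c hcmem =>
    Nat.isDigit_of_mem_toDigits (by norm_num) (le_refl 10) hcmem
  have hDpos : 0 < D.length := Nat.length_toDigits_pos
  -- zfill
  set Z := PySem.Chars.zfill D 8 with hZ
  have hZlen : 8 ≤ Z.length := by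
    rw [hZ, PySem.Chars.length_zfill]; omega
  have hZdig : ∀ c ∈ Z, c.isDigit = true := pvZfill8_digits hDdig hDpos
  -- the slice is (Z.drop 2).take 4
  have hslice : PySem.List.slice Z (some 2) (some 6) = (Z.drop 2).take 4 := by
    rw [PySem.List.slice_toNat Z (by norm_num) (by norm_num)]
    rfl
  have hSlen : ((Z.drop 2).take 4).length = 4 := by
    rw [List.length_take, List.length_drop]; omega
  have hSdig : ∀ c ∈ (Z.drop 2).take 4, c.isDigit = true := fun c hcmem =>
    hZdig c (List.mem_of_mem_drop (List.mem_of_mem_take hcmem))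
  obtain ⟨a, b, c, d, hSe⟩ := pvListFour _ hSlen
  rw [hSe] at hSdig
  obtain ⟨v, hv, hv0, hv1⟩ := pvParse4_bound
    (hSdig a (by simp)) (hSdig b (by simp)) (hSdig c (by simp)) (hSdig d (by simp))
  refine ⟨v, ?_, hv0, hv1⟩
  unfold PySem.Int.ofStr?
  rw [PySem.Str.toList_slice, PySem.Str.toList_zfill, PySem.Int.toList_toStr, hchars]
  show PySem.Int.ofChars? (PySem.List.slice Z (some 2) (some 6)) = some v
  rw [hslice, hSe, hv]

lemma pvStep_bound (y : Int) : 0 ≤ pvMidStep y ∧ pvMidStep y < 10000 := by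
  obtain ⟨v, hv, h0, h1⟩ := pvStep_val y
  unfold pvMidStep
  rw [hv]
  exact ⟨h0, h1⟩

-- A's loop body computes the same step (current ** 2 = current * current)
lemma pvStepA_eq (c : Int) :
    (PySem.Int.ofStr?
      (PySem.Str.slice (PySem.Str.zfill (PySem.Int.toStr (c ^ 2)) 8) (some 2) (some 6))).getD 0
      = pvMidStep c := by
  rw [pow_two]; rfl

-- ---- the sequence repeats within 10001 steps ----

lemma pvRep (x : Int) : ∃ i j, i < j ∧ j ≤ 10001 ∧ pvIt x i = pvIt x j := by
  have h : ∃ a ∈ Finset.range 10001, ∃ b ∈ Finset.range 10001,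
      a ≠ b ∧ pvIt x (a + 1) = pvIt x (b + 1) := by
    apply Finset.exists_ne_map_eq_of_card_lt_of_maps_to (t := Finset.Icc (0 : Int) 9999)
    · rw [Finset.card_range, Int.card_Icc]; norm_num
    · intro k _
      have hb := pvStep_bound (pvIt x k)
      simp only [Finset.mem_coe, Finset.mem_Icc, pvIt_succ]
      omega
  obtain ⟨a, ha, b, hb, hne, heq⟩ := h
  rw [Finset.mem_range] at ha hb
  rcases Nat.lt_or_ge a b with hab | hab
  · exact ⟨a + 1, b + 1, by omega, by omega, heq⟩
  · exact ⟨b + 1, a + 1, by omega, by omega, heq.symm⟩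

-- ---- specs and minimality of pvN0, pvMu, pvLam ----

lemma pvN0_nonempty (x : Int) : {n | ∃ i, i < n ∧ pvIt x i = pvIt x n}.Nonempty := by
  obtain ⟨i, j, hij, _, heq⟩ := pvRep x
  exact ⟨j, i, hij, heq⟩

lemma pvN0_spec (x : Int) : ∃ i, i < pvN0 x ∧ pvIt x i = pvIt x (pvN0 x) :=
  Nat.sInf_mem (pvN0_nonempty x)

lemma pvN0_min (x : Int) {k : Nat} (h : k < pvN0 x) : ¬∃ i, i < k ∧ pvIt x i = pvIt x k :=
  by
  intro hmem
  have hk : k ∈ {n | ∃ i, i < n ∧ pvIt x i = pvIt x n} := hmem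
  have hle := Nat.sInf_le hk
  unfold pvN0 at h
  omega

lemma pvN0_le (x : Int) : pvN0 x ≤ 10001 := by
  obtain ⟨i, j, hij, hj, heq⟩ := pvRep x
  exact le_trans (Nat.sInf_le ⟨i, hij, heq⟩) hj

lemma pvMu_le (x : Int) {i j : Nat} (hij : i < j) (h : pvIt x i = pvIt x j) : pvMu x ≤ i :=
  Nat.sInf_le ⟨j, hij, h⟩

lemma pvMu_spec (x : Int) : ∃ j, pvMu x < j ∧ pvIt x (pvMu x) = pvIt x j := by
  obtain ⟨i, j, hij, _, heq⟩ := pvRep x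
  have hne : {i | ∃ j, i < j ∧ pvIt x i = pvIt x j}.Nonempty := ⟨i, j, hij, heq⟩
  exact Nat.sInf_mem hne

lemma pvLam_nonempty (x : Int) :
    {p | 0 < p ∧ pvIt x (pvMu x + p) = pvIt x (pvMu x)}.Nonempty := by
  obtain ⟨j, hj, heq⟩ := pvMu_spec x
  refine ⟨j - pvMu x, by omega, ?_⟩
  rw [show pvMu x + (j - pvMu x) = j by omega]
  exact heq.symm

lemma pvLam_pos (x : Int) : 0 < pvLam x := (Nat.sInf_mem (pvLam_nonempty x)).1

lemma pvLam_spec (x : Int) : pvIt x (pvMu x + pvLam x) = pvIt x (pvMu x) :=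
  (Nat.sInf_mem (pvLam_nonempty x)).2

lemma pvLam_min (x : Int) {p : Nat} (hp : 0 < p) (h : p < pvLam x) :
    pvIt x (pvMu x + p) ≠ pvIt x (pvMu x) := by
  intro heq
  have hk : p ∈ {p | 0 < p ∧ pvIt x (pvMu x + p) = pvIt x (pvMu x)} := ⟨hp, heq⟩
  have hle := Nat.sInf_le hk
  unfold pvLam at h
  omega

-- ---- periodicity ----

lemma pvPer_one (x : Int) {i : Nat} (h : pvMu x ≤ i) : pvIt x (i + pvLam x) = pvIt x i := by
  have hbase := pvLam_spec x
  have := pvIt_congr_add x (i - pvMu x) hbase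
  rw [show i - pvMu x + (pvMu x + pvLam x) = i + pvLam x by omega,
      show i - pvMu x + pvMu x = i by omega] at this
  exact this

lemma pvPer (x : Int) {i : Nat} (h : pvMu x ≤ i) (k : Nat) :
    pvIt x (i + k * pvLam x) = pvIt x i := by
  induction k with
  | zero => simp
  | succ k ih =>
    have h2 : pvMu x ≤ i + k * pvLam x := le_trans h (Nat.le_add_right i _)
    have hstep := pvPer_one x h2
    rw [show i + (k + 1) * pvLam x = i + k * pvLam x + pvLam x by ring, hstep, ih]

lemma pvLam_dvd (x : Int) {i p : Nat} (_hi : pvMu x ≤ i) (_hp : 0 < p)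
    (h : pvIt x (i + p) = pvIt x i) : pvLam x ∣ p := by
  by_contra hnd
  set lam := pvLam x with hlam
  set mu := pvMu x with hmu
  have hlpos : 0 < lam := pvLam_pos x
  set q := p / lam with hqdef
  set r := p % lam with hrdef
  have hq : q * lam + r = p := by
    rw [hqdef, hrdef, Nat.mul_comm]; exact Nat.div_add_mod p lam
  have hr0 : r ≠ 0 := by
    intro h0
    exact hnd ⟨q, by omega⟩
  have hrlt : r < lam := Nat.mod_lt _ hlpos
  -- it (mu + i*lam) = it mu
  have h1 : pvIt x (mu + i * lam) = pvIt x mu := pvPer x (le_refl mu) i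
  -- mu + i*lam ≥ i
  have hge : i ≤ mu + i * lam := by
    calc i = i * 1 := by ring
    _ ≤ i * lam := Nat.mul_le_mul_left i hlpos
    _ ≤ mu + i * lam := by omega
  -- it (mu + i*lam + p) = it (mu + i*lam)
  have h2 : pvIt x (mu + i * lam + p) = pvIt x (mu + i * lam) := by
    have := pvIt_congr_add x (mu + i * lam - i) h
    rw [show mu + i * lam - i + (i + p) = mu + i * lam + p by omega,
        show mu + i * lam - i + i = mu + i * lam by omega] at this
    exact this
  -- it (mu + i*lam + p) = it (mu + r)
  have h3 : pvIt x (mu + i * lam + p) = pvIt x (mu + r) := by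
    have := pvPer x (i := mu + r) (by omega) (i + q)
    rw [show mu + r + (i + q) * lam = mu + i * lam + p by
      rw [Nat.add_mul]; omega] at this
    exact this
  have : pvIt x (mu + r) = pvIt x mu := by rw [← h3, h2, h1]
  exact pvLam_min x (by omega) hrlt this

lemma pvN0_eq (x : Int) : pvMu x + pvLam x = pvN0 x := by
  have hle : pvN0 x ≤ pvMu x + pvLam x := by
    apply Nat.sInf_le
    exact ⟨pvMu x, by have := pvLam_pos x; omega, (pvLam_spec x).symm⟩
  have hge : pvMu x + pvLam x ≤ pvN0 x := by
    obtain ⟨i, hi, heq⟩ := pvN0_spec x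
    have hmu : pvMu x ≤ i := pvMu_le x hi heq
    have hdvd : pvLam x ∣ pvN0 x - i := by
      apply pvLam_dvd x hmu (by omega)
      rw [show i + (pvN0 x - i) = pvN0 x by omega]
      exact heq.symm
    have := Nat.le_of_dvd (by omega) hdvd
    omega
  omega

lemma pvMu_le_n0 (x : Int) : pvMu x ≤ pvN0 x := by have := pvN0_eq x; omega
lemma pvLam_le_n0 (x : Int) : pvLam x ≤ pvN0 x := by have := pvN0_eq x; omega

-- ---- the Floyd meeting point ----

lemma pvM_nonempty (x : Int) : {m | 0 < m ∧ pvIt x m = pvIt x (2 * m)}.Nonempty := by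
  set lam := pvLam x with hlam
  set mu := pvMu x with hmu
  have hlpos : 0 < lam := pvLam_pos x
  set q := mu / lam with hqdef
  set r := mu % lam with hrdef
  have hq : q * lam + r = mu := by
    rw [hqdef, hrdef, Nat.mul_comm]; exact Nat.div_add_mod mu lam
  have hrlt : r < lam := Nat.mod_lt _ hlpos
  refine ⟨(q + 1) * lam, by positivity, ?_⟩
  have hge : mu ≤ (q + 1) * lam := by rw [Nat.add_mul]; omega
  have := pvPer x (i := (q + 1) * lam) hge (q + 1)
  rw [show (q + 1) * lam + (q + 1) * lam = 2 * ((q + 1) * lam) by ring] at this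
  exact this.symm

lemma pvM_pos (x : Int) : 0 < pvM x := (Nat.sInf_mem (pvM_nonempty x)).1

lemma pvM_spec (x : Int) : pvIt x (pvM x) = pvIt x (2 * pvM x) :=
  (Nat.sInf_mem (pvM_nonempty x)).2

lemma pvM_min (x : Int) {m : Nat} (hm : 0 < m) (h : m < pvM x) :
    pvIt x m ≠ pvIt x (2 * m) := by
  intro heq
  have hk : m ∈ {m | 0 < m ∧ pvIt x m = pvIt x (2 * m)} := ⟨hm, heq⟩
  have hle := Nat.sInf_le hk
  unfold pvM at h
  omega

lemma pvM_le (x : Int) : pvM x ≤ pvMu x + pvLam x := by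
  set lam := pvLam x with hlam
  set mu := pvMu x with hmu
  have hlpos : 0 < lam := pvLam_pos x
  set q := mu / lam with hqdef
  have hq : q * lam + mu % lam = mu := by
    rw [hqdef, Nat.mul_comm]; exact Nat.div_add_mod mu lam
  have hrlt : mu % lam < lam := Nat.mod_lt _ hlpos
  -- the witness used in pvM_nonempty is (q+1)*lam ≤ mu + lam
  have hwit : pvM x ≤ (q + 1) * lam := by
    apply Nat.sInf_le
    have hge : mu ≤ (q + 1) * lam := by rw [Nat.add_mul]; omega
    have := pvPer x (i := (q + 1) * lam) hge (q + 1)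
    rw [show (q + 1) * lam + (q + 1) * lam = 2 * ((q + 1) * lam) by ring] at this
    exact ⟨by positivity, this.symm⟩
  have : (q + 1) * lam ≤ mu + lam := by rw [Nat.add_mul]; omega
  omega

lemma pvMu_le_M (x : Int) : pvMu x ≤ pvM x :=
  pvMu_le x (i := pvM x) (j := 2 * pvM x) (by have := pvM_pos x; omega) (pvM_spec x)

lemma pvLam_dvd_M (x : Int) : pvLam x ∣ pvM x := by
  apply pvLam_dvd x (pvMu_le_M x) (pvM_pos x)
  rw [show pvM x + pvM x = 2 * pvM x by ring]
  exact (pvM_spec x).symm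

lemma pvIt_M_add_mu (x : Int) : pvIt x (pvM x + pvMu x) = pvIt x (pvMu x) := by
  obtain ⟨k, hk⟩ := pvLam_dvd_M x
  have := pvPer x (i := pvMu x) (le_refl _) k
  rw [show pvMu x + k * pvLam x = pvM x + pvMu x by rw [Nat.mul_comm]; omega] at this
  exact this

-- ---- A's loop returns pvN0 ----

lemma pvLoopA_run (x : Int) : ∀ (fuel k : Nat), k ≤ pvN0 x → pvN0 x - k < fuel →
    pvLoopA fuel ((List.range k).map (pvIt x)) (pvIt x k) = (pvN0 x : Int) := by
  intro fuel
  induction fuel with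
  | zero => intro k _ h; omega
  | succ fuel ih =>
    intro k hk hfuel
    rcases Nat.eq_or_lt_of_le hk with heq | hlt
    · -- k = pvN0 x : the current value is already in seen
      obtain ⟨i, hi, hieq⟩ := pvN0_spec x
      rw [← heq] at hi hieq
      have hmem : pvIt x k ∈ (List.range k).map (pvIt x) :=
        List.mem_map.mpr ⟨i, List.mem_range.mpr hi, hieq⟩
      unfold pvLoopA
      rw [PySem.Set.contains_eq_decide, decide_eq_true hmem]
      simp only [if_true, PySem.Set.len_eq, List.length_map, List.length_range]
      exact_mod_cast congrArg (Nat.cast : Nat → Int) heq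
    · -- k < pvN0 x : the current value is new
      have hmem : pvIt x k ∉ (List.range k).map (pvIt x) := by
        intro hmem
        obtain ⟨i, hi, hieq⟩ := List.mem_map.mp hmem
        exact pvN0_min x hlt ⟨i, List.mem_range.mp hi, hieq⟩
      unfold pvLoopA
      rw [PySem.Set.contains_eq_decide, decide_eq_false hmem]
      simp only [Bool.false_eq_true, if_false]
      rw [PySem.Set.add_of_not_mem hmem, pvStepA_eq]
      have hstep : (List.range k).map (pvIt x) ++ [pvIt x k] = (List.range (k + 1)).map (pvIt x) := by
        rw [List.range_succ, List.map_append, List.map_singleton]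
      rw [hstep, ← pvIt_succ]
      exact ih (k + 1) hlt (by omega)

lemma pvA_eq (x : Int) : count_diff_middle x = (pvN0 x : Int) := by
  have h := pvLoopA_run x 20000 0 (Nat.zero_le _) (by have := pvN0_le x; omega)
  simpa [count_diff_middle, PySem.Set.empty_eq] using h

-- ---- B's three loops ----

lemma pvFloyd1_run (x : Int) : ∀ (fuel m : Nat), 0 < m → m ≤ pvM x → pvM x - m < fuel →
    pvFloyd1 fuel (pvIt x m) (pvIt x (2 * m)) = pvIt x (pvM x) := by
  intro fuel
  induction fuel with
  | zero => intro m _ _ h; omega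
  | succ fuel ih =>
    intro m hm hle hfuel
    rcases Nat.eq_or_lt_of_le hle with heq | hlt
    · subst heq
      unfold pvFloyd1
      rw [if_pos (pvM_spec x)]
    · unfold pvFloyd1
      rw [if_neg (pvM_min x hm hlt)]
      rw [← pvIt_succ, ← pvIt_succ, ← pvIt_succ,
          show 2 * m + 1 + 1 = 2 * (m + 1) by ring]
      exact ih (m + 1) (by omega) hlt (by omega)

lemma pvFloyd2_run (x : Int) : ∀ (fuel i : Nat), i ≤ pvMu x → pvMu x - i < fuel →
    pvFloyd2 fuel (pvIt x i) (pvIt x (pvM x + i)) (i : Int)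
      = ((pvMu x : Int), pvIt x (pvM x + pvMu x)) := by
  intro fuel
  induction fuel with
  | zero => intro i _ h; omega
  | succ fuel ih =>
    intro i hle hfuel
    rcases Nat.eq_or_lt_of_le hle with heq | hlt
    · subst heq
      unfold pvFloyd2
      rw [if_pos (pvIt_M_add_mu x).symm]
    · have hne : pvIt x i ≠ pvIt x (pvM x + i) := by
        intro heq
        have := pvMu_le x (i := i) (j := pvM x + i) (by have := pvM_pos x; omega) heq
        omega
      unfold pvFloyd2
      rw [if_neg hne, ← pvIt_succ, ← pvIt_succ,
          show pvM x + i + 1 = pvM x + (i + 1) by ring,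
          show (i : Int) + 1 = ((i + 1 : Nat) : Int) by push_cast; ring]
      exact ih (i + 1) hlt (by omega)

lemma pvFloyd3_run (x : Int) : ∀ (fuel p : Nat), 0 < p → p ≤ pvLam x → pvLam x - p < fuel →
    pvFloyd3 fuel (pvIt x (pvMu x + p)) (pvIt x (pvMu x)) (p : Int) = (pvLam x : Int) := by
  intro fuel
  induction fuel with
  | zero => intro p _ _ h; omega
  | succ fuel ih =>
    intro p hp hle hfuel
    rcases Nat.eq_or_lt_of_le hle with heq | hlt
    · subst heq
      unfold pvFloyd3
      rw [if_pos (pvLam_spec x)]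
    · unfold pvFloyd3
      rw [if_neg (pvLam_min x hp hlt), ← pvIt_succ,
          show pvMu x + p + 1 = pvMu x + (p + 1) by ring,
          show (p : Int) + 1 = ((p + 1 : Nat) : Int) by push_cast; ring]
      exact ih (p + 1) (by omega) hlt (by omega)

lemma pvB_eq (x : Int) : count_diff_middle_alt x = (pvN0 x : Int) := by
  have hMpos := pvM_pos x
  have hMle : pvM x ≤ 10001 := by
    have h1 := pvM_le x
    have h2 := pvN0_eq x
    have h3 := pvN0_le x
    omega
  have hMule := pvMu_le_n0 x
  have hLamle := pvLam_le_n0 x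
  have hN0le := pvN0_le x
  have hLampos := pvLam_pos x
  show (pvFloyd2 20000 x (pvFloyd1 20000 (pvMidStep x) (pvMidStep (pvMidStep x))) 0).1
      + pvFloyd3 20000
          (pvMidStep (pvFloyd2 20000 x (pvFloyd1 20000 (pvMidStep x) (pvMidStep (pvMidStep x))) 0).2)
          (pvFloyd2 20000 x (pvFloyd1 20000 (pvMidStep x) (pvMidStep (pvMidStep x))) 0).2 1
      = (pvN0 x : Int)
  -- phase 1
  have h1 : pvFloyd1 20000 (pvMidStep x) (pvMidStep (pvMidStep x)) = pvIt x (pvM x) := by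
    have := pvFloyd1_run x 20000 1 (by omega) (by omega) (by omega)
    rw [show pvIt x 1 = pvMidStep x from pvIt_succ x 0,
        show pvIt x (2 * 1) = pvMidStep (pvMidStep x) by
          rw [show 2 * 1 = 1 + 1 by ring, pvIt_succ, pvIt_succ]; rfl] at this
    exact this
  rw [h1]
  -- phase 2
  have h2 : pvFloyd2 20000 x (pvIt x (pvM x)) 0
      = ((pvMu x : Int), pvIt x (pvM x + pvMu x)) := by
    have := pvFloyd2_run x 20000 0 (Nat.zero_le _) (by omega)
    simpa [pvIt_zero] using this
  rw [h2]
  -- phase 3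
  have h3 : pvFloyd3 20000 (pvMidStep (pvIt x (pvM x + pvMu x))) (pvIt x (pvM x + pvMu x)) 1
      = (pvLam x : Int) := by
    rw [pvIt_M_add_mu x]
    have := pvFloyd3_run x 20000 1 (by omega) (by omega) (by omega)
    rw [show pvMu x + 1 = pvMu x + 1 by rfl, pvIt_succ] at this
    simpa using this
  simp only [h3]
  have := pvN0_eq x
  omega

-- ===== VERDICT (by name: the statement is the Claim_ definition above) =====
theorem count_diff_middle_spec : Claim_equal_count_diff_middle := by
  intro target _
  unfold Spec_count_diff_middle
  rw [pvA_eq, pvB_eq]
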